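-- pv_equiv track=rewrite | github.com/kenbin64/butterfly-platform | tests/test_foundation1.py | fibonacci_capped
-- ===== SOURCE A (Python) =====
-- from typing import Any, Dict, List, Tuple, Iterable
--
-- def fibonacci_capped(last_value: int = 21) -> List[int]:
--     if last_value <= 0:
--         raise ValueError("Cap must be positive")
--     seq = [1, 1]
--     while seq[-1] < last_value:
--         seq.append(seq[-1] + seq[-2])
--     if seq[-1] != last_value:
--         # If cap not exactly on a Fibonacci number, remove the last overshoot
--         while seq and seq[-1] > last_value:
--             seq.pop()
--         # Ensure we do not exceed the cap
--         if not seq or seq[-1] != last_value: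
--             # If last_value is not a Fibonacci number, append no further values
--             pass
--     # Remove duplicates beyond the cap if any logic drifted
--     return [n for n in seq if n <= last_value]
-- ===== SOURCE B (Python) =====
-- from typing import List
--
-- def _fib_pair(n: int):
--     # fast doubling: returns (F(n), F(n+1))
--     if n == 0:
--         return (0, 1)
--     a, b = _fib_pair(n // 2)
--     c = a * (2 * b - a)
--     d = a * a + b * b
--     if n % 2 == 1:
--         return (d, c + d)
--     return (c, d)
--
-- def fibonacci_capped(last_value: int = 21) -> List[int]:
--     if last_value <= 0:
--         raise ValueError("Cap must be positive")
--     out = []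
--     n = 1
--     while True:
--         f = _fib_pair(n)[0]
--         if f > last_value:
--             return out
--         out.append(f)
--         n += 1
-- ===== Notes on version B (the rewrite author's own statement) =====
-- stated objective: alternative
-- what changed: A builds a rolling Fibonacci list by overshooting, then pops the overshoot and filters; B computes each Fibonacci number independently via the fast-doubling identities (recursion on the index's binary representation) and emits them while they stay within the cap, with no rolling pair, no pruning and no filter pass.
import Mathlib
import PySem

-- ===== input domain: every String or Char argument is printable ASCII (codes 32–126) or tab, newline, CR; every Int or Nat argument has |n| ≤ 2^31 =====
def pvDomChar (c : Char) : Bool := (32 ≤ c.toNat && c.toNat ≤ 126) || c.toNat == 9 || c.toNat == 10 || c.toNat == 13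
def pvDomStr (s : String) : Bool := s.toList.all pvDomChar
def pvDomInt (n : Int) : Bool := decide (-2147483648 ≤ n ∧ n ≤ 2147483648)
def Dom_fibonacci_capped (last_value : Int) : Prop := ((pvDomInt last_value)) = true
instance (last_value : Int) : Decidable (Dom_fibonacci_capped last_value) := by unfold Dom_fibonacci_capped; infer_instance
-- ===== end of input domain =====

-- B replaces A's rolling build/pop/filter pipeline by computing each Fibonacci number
-- independently with the fast-doubling identities (objective: alternative).

-- ===== PORT A =====
-- A's growing `while seq[-1] < last_value: seq.append(seq[-1]+seq[-2])` loop, carrying the last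
-- two elements a = seq[-2], b = seq[-1]; returns the appended portion of seq.  The Nat argument
-- is fuel, a totality guard only: fibonacci_capped passes (last_value+1).toNat, an upper bound on
-- the iteration count since b grows by at least 1 per step; the loop exits by its own condition.
def growA (last_value : Int) : Nat → Int → Int → List Int
  | 0, _, _ => []
  | fuel + 1, a, b => if b < last_value then (a + b) :: growA last_value fuel b (a + b) else []

-- A's `while seq and seq[-1] > last_value: seq.pop()` loop, run on the reversed list
-- (popping from the end = dropping from the front of the reverse).
def popRevA (last_value : Int) : List Int → List Int
  | [] => []
  | x :: xs => if x > last_value then popRevA last_value xs else x :: xs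

def fibonacci_capped (last_value : Int) : List Int :=
  if last_value ≤ 0 then []  -- Python raises ValueError here; excluded by Pre_
  else
    let seq := 1 :: 1 :: growA last_value (last_value + 1).toNat 1 1
    -- seq[-1]: seq is nonempty by construction, so getLast?.getD 0 is exact
    let seq2 := if seq.getLast?.getD 0 ≠ last_value
                then (popRevA last_value seq.reverse).reverse
                else seq
    -- the inner `if not seq or seq[-1] != last_value: pass` does nothing
    seq2.filter (fun n => n ≤ last_value)

-- ===== PORT B =====
-- B's `_fib_pair`: fast doubling, returns (F(n), F(n+1)); recursion on n // 2.
def fibPair : Nat → Int × Int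
  | 0 => (0, 1)
  | n + 1 =>
    let p := fibPair ((n + 1) / 2)
    let a := p.1
    let b := p.2
    let c := a * (2 * b - a)
    let d := a * a + b * b
    if (n + 1) % 2 = 1 then (d, c + d) else (c, d)
decreasing_by exact Nat.div_lt_self (by omega) (by omega)

-- B's `while True: f = _fib_pair(n)[0]; if f > last_value: return out; out.append(f); n += 1`
-- loop.  The Nat argument is fuel, a totality guard only: fibonacci_capped_alt passes
-- (last_value+2).toNat, an upper bound on the iteration count since F(n) ≥ n-1 here; the
-- loop exits by its own `return`.
def loopB (last_value : Int) : Nat → Nat → List Int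
  | 0, _ => []
  | fuel + 1, n =>
    let f := (fibPair n).1
    if f > last_value then [] else f :: loopB last_value fuel (n + 1)

def fibonacci_capped_alt (last_value : Int) : List Int :=
  if last_value ≤ 0 then []  -- Python raises ValueError here; excluded by Pre_
  else loopB last_value (last_value + 2).toNat 1

-- ===== PRECONDITION & SPEC =====
-- Pre_ excludes last_value ≤ 0, where both A and B raise ValueError.
def Pre_fibonacci_capped (last_value : Int) : Prop := 1 ≤ last_value
instance (last_value : Int) : Decidable (Pre_fibonacci_capped last_value) := by unfold Pre_fibonacci_capped; infer_instance
def pvWitness_fibonacci_capped : Int := 21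

def Spec_fibonacci_capped (last_value : Int) (out : List Int) : Prop := out = fibonacci_capped_alt last_value
instance (last_value : Int) (out : List Int) : Decidable (Spec_fibonacci_capped last_value out) := by unfold Spec_fibonacci_capped; infer_instance

-- ===== CLAIM (what is proved, stated in full; the proofs are below) =====
def Claim_equal_fibonacci_capped : Prop := ∀ (last_value : Int), Dom_fibonacci_capped last_value → Pre_fibonacci_capped last_value → Spec_fibonacci_capped last_value (fibonacci_capped last_value)

-- ===== LEMMAS AND PROOFS =====

-- fast doubling computes Fibonacci
theorem fibPair_eq (n : Nat) : fibPair n = ((Nat.fib n : Int), (Nat.fib (n + 1) : Int)) := by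
  induction n using Nat.strong_induction_on with
  | _ n ih =>
    match n with
    | 0 => simp [fibPair]
    | m + 1 =>
      rw [fibPair]
      have hlt : (m + 1) / 2 < m + 1 := Nat.div_lt_self (by omega) (by omega)
      rw [ih _ hlt]
      set k := (m + 1) / 2 with hk
      have hmono : Nat.fib k ≤ Nat.fib (k + 1) := Nat.fib_le_fib_succ
      have h2m : (Nat.fib (2 * k) : Int) = (Nat.fib k : Int) * (2 * (Nat.fib (k + 1) : Int) - (Nat.fib k : Int)) := by
        have hle2 : Nat.fib k ≤ 2 * Nat.fib (k + 1) := by omega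
        have := Nat.fib_two_mul k
        zify [hle2] at this
        linarith
      have h2m1 : (Nat.fib (2 * k + 1) : Int) = (Nat.fib k : Int) * (Nat.fib k : Int) + (Nat.fib (k + 1) : Int) * (Nat.fib (k + 1) : Int) := by
        have := Nat.fib_two_mul_add_one k
        zify at this
        rw [this]; ring
      have hsum : (Nat.fib (2 * k + 1 + 1) : Int) = (Nat.fib (2 * k) : Int) + (Nat.fib (2 * k + 1) : Int) := by
        have := @Nat.fib_add_two (2 * k)
        zify at this
        rw [show 2 * k + 1 + 1 = 2 * k + 2 from rfl, this]
      by_cases hpar : (m + 1) % 2 = 1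
      · have h1 : m + 1 = 2 * k + 1 := by omega
        rw [if_pos hpar, h1]
        refine Prod.ext ?_ ?_ <;> simp only [Prod.fst, Prod.snd] <;>
          linarith [h2m, h2m1, hsum]
      · have h1 : m + 1 = 2 * k := by omega
        rw [if_neg hpar, h1]
        refine Prod.ext ?_ ?_ <;> simp only [Prod.fst, Prod.snd] <;>
          linarith [h2m, h2m1, hsum]

-- Proof-side helper: B's loop re-expressed as a rolling pair (a, b) = (F(n), F(n+1)).
def altLoop (last_value : Int) : Nat → Int → Int → List Int
  | 0, _, _ => []
  | fuel + 1, a, b => if a ≤ last_value then a :: altLoop last_value fuel b (a + b) else []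

theorem loopB_eq_altLoop (L : Int) : ∀ (f : Nat) (n : Nat),
    loopB L f n = altLoop L f (Nat.fib n : Int) (Nat.fib (n + 1) : Int) := by
  intro f
  induction f with
  | zero => intro n; rfl
  | succ g ih =>
    intro n
    rw [loopB, altLoop]
    simp only [fibPair_eq]
    by_cases h : (Nat.fib n : Int) > L
    · simp [h, show ¬ ((Nat.fib n : Int) ≤ L) from by omega]
    · have hle : (Nat.fib n : Int) ≤ L := by omega
      simp only [h, hle, if_true, if_false]
      rw [ih (n + 1)]
      have : (Nat.fib (n + 1 + 1) : Int) = (Nat.fib n : Int) + (Nat.fib (n + 1) : Int) := by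
        have := @Nat.fib_add_two n
        zify at this
        rw [show n + 1 + 1 = n + 2 from rfl, this]
      rw [this]

-- Dropping trailing >cap elements does not change the ≤cap filter.
theorem filter_popRevA (L : Int) (t : List Int) :
    (popRevA L t).filter (fun n => n ≤ L) = t.filter (fun n => n ≤ L) := by
  induction t with
  | nil => rfl
  | cons x xs ih =>
    simp only [popRevA]
    split
    · rename_i hx
      rw [ih]
      simp only [List.filter_cons]
      have : ¬ (x ≤ L) := by omega
      simp [this]
    · rfl

-- With enough fuel on both sides, filtering the seq suffix b :: (appended portion) to ≤L
-- yields exactly the rolling-pair loop run from (b, a+b).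
theorem filter_growA (L : Int) : ∀ (f₁ f₂ : Nat) (a b : Int), 1 ≤ a → a ≤ b →
    L ≤ b + (f₁ : Int) → L + 1 ≤ b + (f₂ : Int) →
    (b :: growA L f₁ a b).filter (fun n => n ≤ L) = altLoop L f₂ b (a + b) := by
  intro f₁
  induction f₁ with
  | zero =>
    intro f₂ a b ha hab h₁ h₂
    simp only [growA, List.filter_cons, List.filter_nil]
    by_cases hb : b ≤ L
    · have hbe : b = L := by omega
      have hf₂ : 1 ≤ f₂ := by omega
      obtain ⟨f₂', rfl⟩ : ∃ k, f₂ = k + 1 := ⟨f₂ - 1, by omega⟩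
      rw [altLoop]
      simp only [hb, if_true]
      cases f₂' with
      | zero => simp [altLoop]
      | succ k =>
        rw [altLoop]
        have : ¬ (a + b ≤ L) := by omega
        simp [this]
    · cases f₂ with
      | zero => simp [altLoop]; omega
      | succ k => rw [altLoop]; simp [hb]
  | succ f ih =>
    intro f₂ a b ha hab h₁ h₂
    rw [growA]
    split
    · rename_i hbL
      obtain ⟨f₂', rfl⟩ : ∃ k, f₂ = k + 1 := ⟨f₂ - 1, by omega⟩
      rw [List.filter_cons]
      have hb : (decide (b ≤ L)) = true := by simp; omega
      rw [hb]
      simp only []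
      rw [ih f₂' b (a + b) (by omega) (by omega) (by push_cast at h₁ ⊢; omega)
            (by push_cast at h₂ ⊢; omega)]
      rw [altLoop]
      have : b ≤ L := by omega
      simp [this]
    · rename_i hbL
      simp only [List.filter_cons, List.filter_nil]
      by_cases hb : b ≤ L
      · have hbe : b = L := by omega
        obtain ⟨f₂', rfl⟩ : ∃ k, f₂ = k + 1 := ⟨f₂ - 1, by omega⟩
        rw [altLoop]
        simp only [hb, if_true]
        cases f₂' with
        | zero => simp [altLoop]
        | succ k =>
          rw [altLoop]
          have : ¬ (a + b ≤ L) := by omega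
          simp [this]
      · cases f₂ with
        | zero => simp [altLoop]; omega
        | succ k => rw [altLoop]; simp [hb]

-- ===== VERDICT (by name: the statement is the Claim_ definition above) =====
theorem fibonacci_capped_spec : Claim_equal_fibonacci_capped := by
  intro L _ hpre
  unfold Spec_fibonacci_capped fibonacci_capped fibonacci_capped_alt
  have hL : ¬ (L ≤ 0) := by unfold Pre_fibonacci_capped at hpre; omega
  have hL1 : (1:Int) ≤ L := by omega
  simp only [hL, if_false]
  have key : ∀ (s : List Int),
      ((popRevA L s.reverse).reverse).filter (fun n => n ≤ L) = s.filter (fun n => n ≤ L) := by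
    intro s
    rw [List.filter_reverse, filter_popRevA, List.filter_reverse, List.reverse_reverse]
  have hseq : (1 :: 1 :: growA L (L + 1).toNat 1 1).filter (fun n => n ≤ L)
      = loopB L (L + 2).toNat 1 := by
    rw [loopB_eq_altLoop L ((L + 2).toNat) 1]
    norm_num [Nat.fib_one, Nat.fib_two]
    rw [List.filter_cons]
    have h1 : (decide ((1:Int) ≤ L)) = true := by simp; omega
    rw [h1]
    simp only []
    obtain ⟨k, hk⟩ : ∃ k, (L + 2).toNat = k + 1 := ⟨(L + 2).toNat - 1, by omega⟩
    rw [filter_growA L (L + 1).toNat k 1 1 (by omega) (by omega) (by omega) (by omega)]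
    rw [hk, altLoop]
    simp [hL1]
  split
  · rw [key, hseq]
  · rw [hseq]
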